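-- pv_equiv track=rewrite | github.com/Brianbru2022/AudioExtractor2 | worker/app/services/chunk_planning/service.py | _prepare_candidates
-- ===== SOURCE A (Python) =====
-- def _prepare_candidates(candidates: list[dict[str, int]]) -> list[dict[str, int]]:
--     seen: set[int] = set()
--     normalized: list[dict[str, int]] = []
--     for candidate in sorted(candidates, key=lambda item: (item["boundary_ms"], item.get("duration_ms", 0))):
--         boundary_ms = int(candidate["boundary_ms"])
--         if boundary_ms in seen:
--             continue
--         seen.add(boundary_ms)
--         normalized.append(
--             {
--                 "start_ms": int(candidate.get("start_ms", boundary_ms)),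
--                 "end_ms": int(candidate.get("end_ms", boundary_ms)),
--                 "duration_ms": int(candidate.get("duration_ms", 0)),
--                 "boundary_ms": boundary_ms,
--             }
--         )
--     return normalized
-- ===== SOURCE B (Python) =====
-- def _prepare_candidates(candidates: list[dict[str, int]]) -> list[dict[str, int]]:
--     out: list[dict[str, int]] = []
--     for b in sorted({c["boundary_ms"] for c in candidates}):
--         best = min((c for c in candidates if c["boundary_ms"] == b),
--                    key=lambda c: c.get("duration_ms", 0))
--         out.append({
--             "start_ms": int(best.get("start_ms", b)),
--             "end_ms": int(best.get("end_ms", b)),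
--             "duration_ms": int(best.get("duration_ms", 0)),
--             "boundary_ms": int(b),
--         })
--     return out
-- ===== Notes on version B (the rewrite author's own statement) =====
-- stated objective: alternative
-- what changed: Replaces A's stable sort of all candidates followed by a seen-set dedup pass with a group-by-boundary approach: iterate the sorted set of distinct boundaries and pick, per boundary, the first minimum-duration candidate via min().
import Mathlib
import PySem

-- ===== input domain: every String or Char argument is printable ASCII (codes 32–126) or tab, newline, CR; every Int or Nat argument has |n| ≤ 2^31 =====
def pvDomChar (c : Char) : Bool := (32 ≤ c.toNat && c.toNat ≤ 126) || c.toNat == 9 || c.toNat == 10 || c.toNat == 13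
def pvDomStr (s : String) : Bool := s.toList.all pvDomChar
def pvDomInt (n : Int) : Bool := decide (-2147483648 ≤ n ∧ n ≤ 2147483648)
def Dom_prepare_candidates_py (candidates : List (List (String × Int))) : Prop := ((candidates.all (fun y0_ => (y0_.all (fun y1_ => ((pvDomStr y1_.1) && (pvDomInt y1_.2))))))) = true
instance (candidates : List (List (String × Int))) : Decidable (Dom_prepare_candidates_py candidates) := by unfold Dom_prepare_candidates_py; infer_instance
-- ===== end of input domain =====

-- B replaces A's sort-then-dedup with "for each distinct boundary in sorted order, pick the first
-- minimum-duration candidate" (objective: alternative; return value only, neither side mutates).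

-- shared dict-access helpers (Python dict → assoc list; lookup = first match, per the type convention)
def pvGet? (c : List (String × Int)) (k : String) : Option Int :=
  (c.find? (fun p => p.1 == k)).map (·.2)

-- total form of candidate["boundary_ms"]; Pre_ guarantees the key is present
def pvBnd (c : List (String × Int)) : Int := (pvGet? c "boundary_ms").getD 0

-- candidate.get("duration_ms", 0)
def pvDur (c : List (String × Int)) : Int := (pvGet? c "duration_ms").getD 0

-- the normalized output dict both Pythons build (b is the boundary value)
def pvNorm (c : List (String × Int)) (b : Int) : List (String × Int) :=
  [("start_ms", (pvGet? c "start_ms").getD b),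
   ("end_ms", (pvGet? c "end_ms").getD b),
   ("duration_ms", pvDur c),
   ("boundary_ms", b)]

-- ===== PORT A =====
def prepare_candidates_py (candidates : List (List (String × Int))) : List (List (String × Int)) :=
  ((PySem.List.sorted2 candidates pvBnd pvDur).foldl
    (fun st c =>
      let b := pvBnd c
      if st.1.contains b then st
      else (st.1.add b, st.2 ++ [pvNorm c b]))
    ((PySem.Set.empty : PySem.Set Int), ([] : List (List (String × Int))))).2

-- ===== PORT B =====
def prepare_candidates_py_alt (candidates : List (List (String × Int))) : List (List (String × Int)) :=
  (PySem.List.sorted (PySem.Set.ofList (candidates.map pvBnd)) (fun x => x)).foldl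
    (fun out b =>
      match PySem.List.min? (candidates.filter (fun c => pvBnd c == b)) pvDur with
      | some best => out ++ [pvNorm best b]
      | none => out)   -- unreachable: b is drawn from the boundary set
    []

-- ===== PRECONDITION & SPEC =====
-- Pre_ excludes exactly the inputs with a candidate lacking the "boundary_ms" key: there Python A raises KeyError.
def Pre_prepare_candidates_py (candidates : List (List (String × Int))) : Prop :=
  ∀ c ∈ candidates, ((c.find? (fun p => p.1 == "boundary_ms")).isSome = true)
instance (candidates : List (List (String × Int))) : Decidable (Pre_prepare_candidates_py candidates) := by unfold Pre_prepare_candidates_py; infer_instance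

def pvWitness_prepare_candidates_py : (List (List (String × Int))) :=
  [[("boundary_ms", 3), ("duration_ms", 2)], [("boundary_ms", 3)], [("boundary_ms", 1)]]

def Spec_prepare_candidates_py (candidates : List (List (String × Int))) (out : List (List (String × Int))) : Prop := out = prepare_candidates_py_alt candidates
instance (candidates : List (List (String × Int))) (out : List (List (String × Int))) : Decidable (Spec_prepare_candidates_py candidates out) := by unfold Spec_prepare_candidates_py; infer_instance

-- ===== CLAIM (what is proved, stated in full; the proofs are below) =====
def Claim_equal_prepare_candidates_py : Prop := ∀ (candidates : List (List (String × Int))), Dom_prepare_candidates_py candidates → Pre_prepare_candidates_py candidates → Spec_prepare_candidates_py candidates (prepare_candidates_py candidates)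

-- ===== LEMMAS AND PROOFS =====

def pvLt (a b : List (String × Int)) : Bool :=
  decide (pvBnd a < pvBnd b) || (!decide (pvBnd b < pvBnd a) && decide (pvDur a < pvDur b))
def pvR (a b : List (String × Int)) : Prop :=
  pvBnd a < pvBnd b ∨ (pvBnd a = pvBnd b ∧ pvDur a ≤ pvDur b)
theorem pvR_of_lt {a b : List (String × Int)} (h : pvLt a b = true) : pvR a b := by
  unfold pvLt at h; unfold pvR; simp at h; omega
theorem pvR_of_not_lt {a b : List (String × Int)} (h : pvLt a b = false) : pvR b a := by
  unfold pvLt at h; unfold pvR; simp at h; omega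
theorem pvR_trans {a b c : List (String × Int)} (h1 : pvR a b) (h2 : pvR b c) : pvR a c := by
  unfold pvR at *; omega

theorem pvInsertBy_pairwise (x : List (String × Int)) (ys : List (List (String × Int)))
    (h : ys.Pairwise pvR) : (PySem.List.insertBy pvLt x ys).Pairwise pvR := by
  induction ys with
  | nil => simp [PySem.List.insertBy]
  | cons y t ih =>
    rcases List.pairwise_cons.mp h with ⟨hy, ht⟩
    rw [show PySem.List.insertBy pvLt x (y :: t)
        = if pvLt x y then x :: y :: t else y :: PySem.List.insertBy pvLt x t from rfl]
    by_cases hxy : pvLt x y = true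
    · rw [if_pos hxy]
      refine List.pairwise_cons.mpr ⟨?_, h⟩
      intro z hz
      rcases List.mem_cons.mp hz with rfl | hz
      · exact pvR_of_lt hxy
      · exact pvR_trans (pvR_of_lt hxy) (hy z hz)
    · rw [if_neg hxy]
      refine List.pairwise_cons.mpr ⟨?_, ih ht⟩
      intro z hz
      rcases (PySem.List.mem_insertBy _ _ _ _).mp hz with rfl | hz
      · exact pvR_of_not_lt (Bool.eq_false_iff.mpr (fun hc => hxy hc))
      · exact hy z hz

theorem pvFoldl_ins_pairwise (xs : List (List (String × Int))) (acc : List (List (String × Int)))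
    (h : acc.Pairwise pvR) :
    (xs.foldl (fun a x => PySem.List.insertBy pvLt x a) acc).Pairwise pvR := by
  induction xs generalizing acc with
  | nil => exact h
  | cons c t ih => exact ih _ (pvInsertBy_pairwise c acc h)

theorem pvSorted2_eq (candidates : List (List (String × Int))) :
    PySem.List.sorted2 candidates pvBnd pvDur =
      candidates.foldl (fun acc x => PySem.List.insertBy pvLt x acc) [] := rfl

theorem pvSorted2_pairwise (candidates : List (List (String × Int))) :
    (PySem.List.sorted2 candidates pvBnd pvDur).Pairwise pvR := by
  rw [pvSorted2_eq]; exact pvFoldl_ins_pairwise _ _ (List.Pairwise.nil)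

theorem pvInsertBy_filter_key (k1 k2 : Int) (x : List (String × Int)) (ys : List (List (String × Int)))
    (h : ys.Pairwise pvR) :
    (PySem.List.insertBy pvLt x ys).filter (fun c => pvBnd c == k1 && pvDur c == k2) =
      ys.filter (fun c => pvBnd c == k1 && pvDur c == k2) ++
        (if (pvBnd x == k1 && pvDur x == k2) = true then [x] else []) := by
  induction ys with
  | nil =>
    rw [show PySem.List.insertBy pvLt x [] = [x] from rfl]
    cases hpk : (pvBnd x == k1 && pvDur x == k2) <;> simp [List.filter, hpk]
  | cons y t ih =>
    rcases List.pairwise_cons.mp h with ⟨hy, ht⟩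
    rw [show PySem.List.insertBy pvLt x (y :: t)
        = if pvLt x y then x :: y :: t else y :: PySem.List.insertBy pvLt x t from rfl]
    by_cases hxy : pvLt x y = true
    · rw [if_pos hxy]
      by_cases hpk : (pvBnd x == k1 && pvDur x == k2) = true
      · -- no element of y :: t can carry the same key as x
        have hpk' : pvBnd x = k1 ∧ pvDur x = k2 := by simpa using hpk
        have hlt : pvBnd x < pvBnd y ∨ (¬ pvBnd y < pvBnd x ∧ pvDur x < pvDur y) := by
          unfold pvLt at hxy; simp at hxy; omega
        have hnone : ∀ z ∈ y :: t, (pvBnd z == k1 && pvDur z == k2) = false := by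
          intro z hz
          have hkey : ¬ (pvBnd z = k1 ∧ pvDur z = k2) := by
            rcases List.mem_cons.mp hz with rfl | hz
            · omega
            · have hR := hy z hz; unfold pvR at hR; omega
          exact Bool.eq_false_iff.mpr (fun hh => hkey (by simpa using hh))
        have hfe : (y :: t).filter (fun c => pvBnd c == k1 && pvDur c == k2) = [] := by
          rw [List.filter_eq_nil_iff]
          intro z hz
          simp [hnone z hz]
        rw [List.filter_cons, if_pos hpk, hfe, if_pos hpk]
        simp
      · rw [List.filter_cons, if_neg hpk, if_neg hpk, List.append_nil]
    · rw [if_neg hxy]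
      rw [List.filter_cons, List.filter_cons, ih ht]
      by_cases hpy : (pvBnd y == k1 && pvDur y == k2) = true
      · rw [if_pos hpy, if_pos hpy]; simp
      · rw [if_neg hpy, if_neg hpy]

theorem pvSorted2_filter_key (candidates : List (List (String × Int))) (k1 k2 : Int) :
    (PySem.List.sorted2 candidates pvBnd pvDur).filter (fun c => pvBnd c == k1 && pvDur c == k2) =
      candidates.filter (fun c => pvBnd c == k1 && pvDur c == k2) := by
  rw [pvSorted2_eq]
  suffices h : ∀ (xs acc : List (List (String × Int))), acc.Pairwise pvR →
      (xs.foldl (fun a x => PySem.List.insertBy pvLt x a) acc).filter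
          (fun c => pvBnd c == k1 && pvDur c == k2) =
        acc.filter (fun c => pvBnd c == k1 && pvDur c == k2) ++
          xs.filter (fun c => pvBnd c == k1 && pvDur c == k2) by
    simpa using h candidates [] List.Pairwise.nil
  intro xs
  induction xs with
  | nil => intro acc _; simp
  | cons c t ih =>
    intro acc hacc
    rw [List.foldl_cons, ih _ (pvInsertBy_pairwise c acc hacc), pvInsertBy_filter_key _ _ _ _ hacc,
      List.filter_cons]
    by_cases hpc : (pvBnd c == k1 && pvDur c == k2) = true
    · rw [if_pos hpc, if_pos hpc]; simp
    · rw [if_neg hpc, if_neg hpc]; simp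

def pvStep (acc : Option (List (String × Int))) (x : List (String × Int)) : Option (List (String × Int)) :=
  match acc with
  | none => some x
  | some m' => if pvDur x < pvDur m' then some x else some m'

theorem pvMin?_eq_foldl (xs : List (List (String × Int))) :
    PySem.List.min? xs pvDur = xs.foldl pvStep none := by
  unfold PySem.List.min?
  congr 1
  funext acc x
  cases acc <;> rfl


theorem pvMin?_foldl_some (m : List (String × Int)) (v : List (List (String × Int)))
    (hv : ∀ y ∈ v, pvDur m ≤ pvDur y) :
    v.foldl pvStep (some m) = some m := by
  induction v with
  | nil => rfl
  | cons y t ih =>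
    rw [List.foldl_cons, show pvStep (some m) y = if pvDur y < pvDur m then some y else some m from rfl,
      if_neg (by have := hv y (List.mem_cons_self); omega)]
    exact ih (fun z hz => hv z (List.mem_cons_of_mem _ hz))

theorem pvMin?_first (m : List (String × Int)) (u v : List (List (String × Int)))
    (hu : ∀ y ∈ u, pvDur m < pvDur y) (hv : ∀ y ∈ v, pvDur m ≤ pvDur y) :
    PySem.List.min? (u ++ m :: v) pvDur = some m := by
  rw [pvMin?_eq_foldl, List.foldl_append, List.foldl_cons]
  cases hfold : u.foldl pvStep none with
  | none =>
    rw [show pvStep none m = some m from rfl]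
    exact pvMin?_foldl_some m v hv
  | some m0 =>
    have hm0 : m0 ∈ u :=
      PySem.List.min?_mem (xs := u) (key := pvDur) ((pvMin?_eq_foldl u).trans hfold)
    rw [show pvStep (some m0) m = if pvDur m < pvDur m0 then some m else some m0 from rfl,
      if_pos (hu m0 hm0)]
    exact pvMin?_foldl_some m v hv

def pvEmit : List (List (String × Int)) → PySem.Set Int → List (List (String × Int))
  | [], _ => []
  | c :: t, s =>
      if s.contains (pvBnd c) then pvEmit t s
      else pvNorm c (pvBnd c) :: pvEmit t (s.add (pvBnd c))

def pvKeys : List (List (String × Int)) → PySem.Set Int → List Int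
  | [], _ => []
  | c :: t, s =>
      if s.contains (pvBnd c) then pvKeys t s
      else pvBnd c :: pvKeys t (s.add (pvBnd c))

def pvChoose (S : List (List (String × Int))) (b : Int) : List (String × Int) :=
  ((S.filter (fun c => pvBnd c == b)).headD [])

theorem pvContains_add (s : PySem.Set Int) (x y : Int) :
    ((s.add x).contains y) = (s.contains y || y == x) := by
  unfold PySem.Set.add PySem.Set.contains
  by_cases hyx : y = x
  · subst hyx
    split_ifs with h
    · simp_all
    · simp_all
  · have hbx : (y == x) = false := beq_eq_false_iff_ne.mpr hyx
    split_ifs with h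
    · simp [hbx]
    · simp [hbx]
      intro he
      exact absurd he hyx

theorem pvFoldA_eq_emit (S : List (List (String × Int))) (s : PySem.Set Int)
    (out : List (List (String × Int))) :
    (S.foldl (fun st c =>
      let b := pvBnd c
      if st.1.contains b then st
      else (st.1.add b, st.2 ++ [pvNorm c b])) (s, out)).2 = out ++ pvEmit S s := by
  induction S generalizing s out with
  | nil => simp [pvEmit]
  | cons c t ih =>
    rw [List.foldl_cons]
    have hstep : (let b := pvBnd c
        if (s, out).1.contains b = true then (s, out)
        else ((s, out).1.add b, (s, out).2 ++ [pvNorm c b]))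
        = if s.contains (pvBnd c) then (s, out)
          else (s.add (pvBnd c), out ++ [pvNorm c (pvBnd c)]) := rfl
    rw [hstep]
    by_cases h : s.contains (pvBnd c) = true
    · rw [if_pos h, ih s out, pvEmit, if_pos h]
    · rw [if_neg h, ih, pvEmit, if_neg h]
      simp

theorem pvMem_keys {S : List (List (String × Int))} {s : PySem.Set Int} {b : Int} :
    b ∈ pvKeys S s ↔ (b ∈ S.map pvBnd ∧ s.contains b = false) := by
  induction S generalizing s with
  | nil => simp [pvKeys]
  | cons c t ih =>
    rw [pvKeys]
    by_cases h : s.contains (pvBnd c) = true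
    · rw [if_pos h, ih]
      simp only [List.map_cons, List.mem_cons]
      constructor
      · rintro ⟨hm, hc⟩; exact ⟨Or.inr hm, hc⟩
      · rintro ⟨hm, hc⟩
        rcases hm with rfl | hm
        · rw [h] at hc; cases hc
        · exact ⟨hm, hc⟩
    · rw [if_neg h, List.mem_cons, ih, pvContains_add]
      have h' : s.contains (pvBnd c) = false := Bool.eq_false_iff.mpr h
      simp only [List.map_cons, List.mem_cons, Bool.or_eq_false_iff, beq_eq_false_iff_ne]
      constructor
      · rintro (rfl | ⟨hm, hc1, hc2⟩)
        · exact ⟨Or.inl rfl, h'⟩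
        · exact ⟨Or.inr hm, hc1⟩
      · rintro ⟨hm, hc⟩
        by_cases hbc : b = pvBnd c
        · exact Or.inl hbc
        · rcases hm with rfl | hm
          · exact absurd rfl hbc
          · exact Or.inr ⟨hm, hc, hbc⟩

theorem pvEmit_eq_map (S : List (List (String × Int))) (s : PySem.Set Int) :
    pvEmit S s = (pvKeys S s).map (fun b => pvNorm (pvChoose S b) b) := by
  induction S generalizing s with
  | nil => simp [pvEmit, pvKeys]
  | cons c t ih =>
    rw [pvEmit, pvKeys]
    by_cases h : s.contains (pvBnd c) = true
    · rw [if_pos h, if_pos h, ih]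
      refine List.map_congr_left ?_
      intro b hb
      have hbc : b ≠ pvBnd c := by
        rcases pvMem_keys.mp hb with ⟨_, hc⟩
        intro he; subst he; rw [h] at hc; cases hc
      have : pvChoose (c :: t) b = pvChoose t b := by
        unfold pvChoose
        rw [List.filter_cons, if_neg (by simp [hbc.symm])]
      rw [this]
    · rw [if_neg h, if_neg h, List.map_cons, ih]
      have hhead : pvChoose (c :: t) (pvBnd c) = c := by
        unfold pvChoose
        rw [List.filter_cons, if_pos (by simp)]
        rfl
      rw [hhead]
      congr 1
      refine List.map_congr_left ?_
      intro b hb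
      have hbc : b ≠ pvBnd c := by
        rcases pvMem_keys.mp hb with ⟨_, hc⟩
        rw [pvContains_add] at hc
        rcases Bool.or_eq_false_iff.mp hc with ⟨_, h2⟩
        exact beq_eq_false_iff_ne.mp h2
      have : pvChoose (c :: t) b = pvChoose t b := by
        unfold pvChoose
        rw [List.filter_cons, if_neg (by simp [hbc.symm])]
      rw [this]

theorem pvKeys_pairwise {S : List (List (String × Int))} (h : S.Pairwise pvR) (s : PySem.Set Int) :
    (pvKeys S s).Pairwise (· < ·) := by
  induction S generalizing s with
  | nil => simp [pvKeys]
  | cons c t ih =>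
    rcases List.pairwise_cons.mp h with ⟨hc, ht⟩
    rw [pvKeys]
    by_cases hcon : s.contains (pvBnd c) = true
    · rw [if_pos hcon]; exact ih ht s
    · rw [if_neg hcon]
      refine List.pairwise_cons.mpr ⟨?_, ih ht _⟩
      intro b hb
      rcases pvMem_keys.mp hb with ⟨hm, hcb⟩
      rw [pvContains_add] at hcb
      rcases Bool.or_eq_false_iff.mp hcb with ⟨_, h2⟩
      have hbc : b ≠ pvBnd c := beq_eq_false_iff_ne.mp h2
      rcases List.mem_map.mp hm with ⟨z, hz, rfl⟩
      have := hc z hz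
      unfold pvR at this
      omega

theorem pvChoose_min (candidates : List (List (String × Int))) (b : Int)
    (hb : b ∈ (PySem.List.sorted2 candidates pvBnd pvDur).map pvBnd) :
    PySem.List.min? (candidates.filter (fun c => pvBnd c == b)) pvDur =
      some (pvChoose (PySem.List.sorted2 candidates pvBnd pvDur) b) := by
  have hperm : (PySem.List.sorted2 candidates pvBnd pvDur).Perm candidates :=
    PySem.List.sorted2_perm candidates pvBnd pvDur false
  rcases List.mem_map.mp hb with ⟨z, hz, hzb⟩
  have hzT : z ∈ (PySem.List.sorted2 candidates pvBnd pvDur).filter (fun c => pvBnd c == b) :=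
    List.mem_filter.mpr ⟨hz, by simp [hzb]⟩
  cases hT : (PySem.List.sorted2 candidates pvBnd pvDur).filter (fun c => pvBnd c == b) with
  | nil => rw [hT] at hzT; cases hzT
  | cons m T' =>
    have hmT : m ∈ (PySem.List.sorted2 candidates pvBnd pvDur).filter (fun c => pvBnd c == b) := by
      rw [hT]; exact List.mem_cons_self
    have hmb : pvBnd m = b := by
      have := (List.mem_filter.mp hmT).2; simpa using this
    have hTpw : ((PySem.List.sorted2 candidates pvBnd pvDur).filter
        (fun c => pvBnd c == b)).Pairwise pvR :=
      (pvSorted2_pairwise candidates).filter _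
    have hminT : ∀ y ∈ (PySem.List.sorted2 candidates pvBnd pvDur).filter
        (fun c => pvBnd c == b), pvDur m ≤ pvDur y := by
      intro y hy
      have hyb : pvBnd y = b := by
        have := (List.mem_filter.mp hy).2; simpa using this
      rw [hT] at hy
      rcases List.mem_cons.mp hy with rfl | hy'
      · exact le_refl _
      · have hpw := hT ▸ hTpw
        have := (List.pairwise_cons.mp hpw).1 y hy'
        unfold pvR at this; omega
    have hTC : ((PySem.List.sorted2 candidates pvBnd pvDur).filter (fun c => pvBnd c == b)).Perm
        (candidates.filter (fun c => pvBnd c == b)) := hperm.filter _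
    have hminC : ∀ y ∈ candidates.filter (fun c => pvBnd c == b), pvDur m ≤ pvDur y := by
      intro y hy
      exact hminT y (hTC.mem_iff.mpr hy)
    -- the exact-key filter is the same on both lists
    have habsorbS : ((PySem.List.sorted2 candidates pvBnd pvDur).filter
          (fun c => pvBnd c == b)).filter (fun c => pvBnd c == b && pvDur c == pvDur m) =
        (PySem.List.sorted2 candidates pvBnd pvDur).filter
          (fun c => pvBnd c == b && pvDur c == pvDur m) := by
      rw [List.filter_filter]
      exact List.filter_congr (fun a _ => by cases h1 : (pvBnd a == b) <;> simp)
    have habsorbC : (candidates.filter (fun c => pvBnd c == b)).filter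
          (fun c => pvBnd c == b && pvDur c == pvDur m) =
        candidates.filter (fun c => pvBnd c == b && pvDur c == pvDur m) := by
      rw [List.filter_filter]
      exact List.filter_congr (fun a _ => by cases h1 : (pvBnd a == b) <;> simp)
    have hCk : (candidates.filter (fun c => pvBnd c == b)).filter
          (fun c => pvBnd c == b && pvDur c == pvDur m) = m :: T'.filter (fun c => pvBnd c == b && pvDur c == pvDur m) := by
      rw [habsorbC, ← pvSorted2_filter_key candidates b (pvDur m), ← habsorbS, hT,
        List.filter_cons, if_pos (by simp [hmb])]
    rcases List.filter_eq_cons_iff.mp hCk with ⟨u, v, hC, hu, _, _⟩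
    have hu' : ∀ y ∈ u, pvDur m < pvDur y := by
      intro y hy
      have hyC : y ∈ candidates.filter (fun c => pvBnd c == b) := by
        rw [hC]; exact List.mem_append_left _ hy
      have hyb : pvBnd y = b := by
        have := (List.mem_filter.mp hyC).2; simpa using this
      have hle := hminC y hyC
      have hne : ¬ (pvBnd y == b && pvDur y == pvDur m) = true := hu y hy
      simp only [Bool.and_eq_true, beq_iff_eq] at hne
      by_cases hdur : pvDur y = pvDur m
      · exact absurd ⟨hyb, hdur⟩ hne
      · omega
    have hv' : ∀ y ∈ v, pvDur m ≤ pvDur y := by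
      intro y hy
      refine hminC y ?_
      rw [hC]
      exact List.mem_append_right _ (List.mem_cons_of_mem _ hy)
    rw [hC, pvMin?_first m u v hu' hv']
    unfold pvChoose
    rw [hT]
    rfl

theorem pvFoldB (candidates S : List (List (String × Int))) (l : List Int)
    (acc : List (List (String × Int)))
    (h : ∀ b ∈ l, PySem.List.min? (candidates.filter (fun c => pvBnd c == b)) pvDur =
      some (pvChoose S b)) :
    l.foldl (fun out b =>
      match PySem.List.min? (candidates.filter (fun c => pvBnd c == b)) pvDur with
      | some best => out ++ [pvNorm best b]
      | none => out) acc = acc ++ l.map (fun b => pvNorm (pvChoose S b) b) := by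
  induction l generalizing acc with
  | nil => simp
  | cons b t ih =>
    rw [List.foldl_cons, h b List.mem_cons_self]
    rw [ih _ (fun b' hb' => h b' (List.mem_cons_of_mem _ hb'))]
    simp

theorem pv_main (candidates : List (List (String × Int))) :
    prepare_candidates_py candidates = prepare_candidates_py_alt candidates := by
  unfold prepare_candidates_py prepare_candidates_py_alt
  rw [pvFoldA_eq_emit (PySem.List.sorted2 candidates pvBnd pvDur) PySem.Set.empty [],
    List.nil_append, pvEmit_eq_map]
  have hperm : (PySem.List.sorted2 candidates pvBnd pvDur).Perm candidates :=
    PySem.List.sorted2_perm candidates pvBnd pvDur false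
  have hpw : (pvKeys (PySem.List.sorted2 candidates pvBnd pvDur) PySem.Set.empty).Pairwise
      (fun a b => a < b) :=
    pvKeys_pairwise (pvSorted2_pairwise candidates) _
  have hnd : (pvKeys (PySem.List.sorted2 candidates pvBnd pvDur) PySem.Set.empty).Nodup :=
    hpw.imp (fun h => ne_of_lt h)
  have hmem : ∀ b, b ∈ pvKeys (PySem.List.sorted2 candidates pvBnd pvDur) PySem.Set.empty ↔
      b ∈ PySem.Set.ofList (candidates.map pvBnd) := by
    intro b
    rw [pvMem_keys, PySem.Set.mem_ofList]
    have : (PySem.Set.empty : PySem.Set Int).contains b = false := rfl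
    rw [this]
    simp [(hperm.map pvBnd).mem_iff]
  have hKperm : (pvKeys (PySem.List.sorted2 candidates pvBnd pvDur) PySem.Set.empty).Perm
      (PySem.Set.ofList (candidates.map pvBnd)) :=
    (List.perm_ext_iff_of_nodup hnd (PySem.Set.nodup_ofList _)).mpr hmem
  rw [PySem.List.sorted_eq_of_perm_of_pairwise_lt _ _ _ hKperm hpw]
  rw [pvFoldB candidates (PySem.List.sorted2 candidates pvBnd pvDur) _ []
    (fun b hb => pvChoose_min candidates b (pvMem_keys.mp hb).1)]
  simp

-- ===== VERDICT (by name: the statement is the Claim_ definition above) =====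
theorem prepare_candidates_py_spec : Claim_equal_prepare_candidates_py := by
  intro candidates _ _
  unfold Spec_prepare_candidates_py
  exact pv_main candidates
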